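-- pv_equiv track=rewrite | github.com/partho-maple/coding-interview-gym | leetcode.com/python/1055_Shortest_Way_to_Form_String.py | shortestWay
-- ===== SOURCE A (Python) =====
-- from collections import defaultdict
-- import bisect
--
-- def shortestWay(source, target):
--     """
--     :type source: str
--     :type target: str
--     :rtype: int
--     """
--     sourceCharIndices = defaultdict(list)
--     for idx, char in enumerate(source):
--         sourceCharIndices[char].append(idx)
--     sourceIdx, subsequencesCount = 0, 0
--     for char in target:
--         if char not in sourceCharIndices:
--             return -1
--         j = bisect.bisect_left(sourceCharIndices[char], sourceIdx)          # index in sourceCharIndices[char] that is >= sourceIdx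
--         if j ==len(sourceCharIndices[char]):                                # wrap around to beginning of source
--             subsequencesCount += 1
--             j = 0
--         sourceIdx = sourceCharIndices[char][j] + 1                          # next index in source
--     return subsequencesCount if sourceIdx == 0 else subsequencesCount + 1   # add 1 for partial source
-- ===== SOURCE B (Python) =====
-- def shortestWay(source, target):
--     copies = 0
--     i = 0
--     while i < len(target):
--         start = i
--         for ch in source:
--             if i < len(target) and ch == target[i]:
--                 i += 1
--         if i == start:
--             return -1
--         copies += 1
--     return copies
-- ===== Notes on version B (the rewrite author's own statement) =====
-- stated objective: simpler
-- what changed: Drops the per-character index table and bisect binary search; B is the classic per-copy two-pointer: scan the whole source once per copy, advancing the target pointer on each match, and return -1 when a full pass makes no progress.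
import Mathlib
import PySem

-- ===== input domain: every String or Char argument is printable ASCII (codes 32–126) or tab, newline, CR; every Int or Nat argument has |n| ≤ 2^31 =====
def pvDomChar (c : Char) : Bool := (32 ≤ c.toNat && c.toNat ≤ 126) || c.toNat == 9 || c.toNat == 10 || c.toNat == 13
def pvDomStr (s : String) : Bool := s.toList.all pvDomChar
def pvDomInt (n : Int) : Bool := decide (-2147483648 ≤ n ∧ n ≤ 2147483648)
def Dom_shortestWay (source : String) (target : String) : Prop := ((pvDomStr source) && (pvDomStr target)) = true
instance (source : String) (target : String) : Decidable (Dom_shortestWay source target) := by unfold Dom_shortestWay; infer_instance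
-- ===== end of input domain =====

-- B replaces A's per-character index table + binary search by the classic per-copy
-- two-pointer scan (one full pass over source per copy); same return value, not faster.

-- ===== PORT A =====
-- A's per-target-char loop: state (sourceIdx, subsequencesCount); early return -1 when
-- a char has no occurrence; final "+1 for partial source" folded into the [] case.
def shortestWayLoop (d : PySem.Dict Char (List Int)) : List Char → Int → Int → Int
  | [], sourceIdx, subsequencesCount =>
      if sourceIdx = 0 then subsequencesCount else subsequencesCount + 1
  | char :: rest, sourceIdx, subsequencesCount =>
      if d.contains char then
        let lst := d.getD char []
        let j := PySem.List.bisectLeft lst sourceIdx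
        let (cnt', j') := if j = lst.length then (subsequencesCount + 1, 0) else (subsequencesCount, j)
        -- Python's lst[j'] : j' is always in range here (the key is present, so lst ≠ []);
        -- pyGetD is that in-range indexing
        shortestWayLoop d rest (PySem.List.pyGetD lst (j' : Int) 0 + 1) cnt'
      else -1

def shortestWay (source : String) (target : String) : Int :=
  let sourceCharIndices :=
    (PySem.List.enumerate source.toList).foldl
      (fun d p => d.modify p.2 [] (fun l => l ++ [p.1])) PySem.Dict.empty
  shortestWayLoop sourceCharIndices target.toList 0 0

-- ===== PORT B =====
-- one full pass of the for-loop over source, advancing the target pointer i on matches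
def passB (t : List Char) (src : List Char) (i : Nat) : Nat :=
  src.foldl (fun i ch => if i < t.length ∧ t[i]? = some ch then i + 1 else i) i

theorem passB_le (t : List Char) (src : List Char) (i : Nat) : i ≤ passB t src i := by
  induction src generalizing i with
  | nil => simp [passB]
  | cons a as ih =>
    show i ≤ passB t as (if i < t.length ∧ t[i]? = some a then i + 1 else i)
    split
    · exact le_trans (Nat.le_succ i) (ih (i + 1))
    · exact ih i

-- the while-loop: pass, check progress, count copies
def loopB (src : List Char) (t : List Char) (i : Nat) (copies : Int) : Int :=
  if h : i < t.length then
    let i' := passB t src i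
    if h2 : i' = i then -1 else loopB src t i' (copies + 1)
  else copies
termination_by t.length - i
decreasing_by
  have := passB_le t src i
  omega

def shortestWay_alt (source : String) (target : String) : Int :=
  loopB source.toList target.toList 0 0

-- ===== PRECONDITION & SPEC =====
def Spec_shortestWay (source : String) (target : String) (out : Int) : Prop := out = shortestWay_alt source target
instance (source : String) (target : String) (out : Int) : Decidable (Spec_shortestWay source target out) := by unfold Spec_shortestWay; infer_instance

-- ===== CLAIM (what is proved, stated in full; the proofs are below) =====
def Claim_equal_shortestWay : Prop := ∀ (source : String) (target : String), Dom_shortestWay source target → Spec_shortestWay source target (shortestWay source target)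

-- ===== LEMMAS AND PROOFS =====

-- first occurrence of c in l (index), none if absent
def ffind : List Char → Char → Option Nat
  | [], _ => none
  | a :: as, c => if a = c then some 0 else (ffind as c).map (· + 1)

-- the list of indices (as Ints, offset k) at which c occurs in l
def lstF : List Char → Int → Char → List Int
  | [], _, _ => []
  | a :: as, k, c => if a = c then k :: lstF as (k + 1) c else lstF as (k + 1) c

-- reference greedy: per target char, next occurrence at position ≥ s, else wrap (count +1)
def goR (src : List Char) : List Char → Nat → Int → Int
  | [], _, cnt => cnt
  | c :: cs, s, cnt =>
    match ffind (src.drop s) c with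
    | some p => goR src cs (s + p + 1) cnt
    | none =>
      match ffind src c with
      | some q => goR src cs (q + 1) (cnt + 1)
      | none => -1

-- list-level version of one pass of B
def passL : List Char → List Char → List Char
  | [], r => r
  | _ :: ss, [] => passL ss []
  | a :: ss, d :: r => if d = a then passL ss r else passL ss (d :: r)

theorem passL_nil (ss : List Char) : passL ss [] = [] := by
  induction ss with
  | nil => rfl
  | cons a ss ih => simpa [passL] using ih

theorem passL_suffix (ss r : List Char) : (passL ss r).IsSuffix r := by
  induction ss generalizing r with
  | nil => simp [passL]
  | cons a ss ih =>
    cases r with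
    | nil => simp [passL_nil]
    | cons d r =>
      simp only [passL]
      split
      · exact (ih r).trans (List.suffix_cons d r)
      · exact ih (d :: r)

-- list-level version of B's while-loop
def loopL (src : List Char) (r : List Char) (copies : Int) : Int :=
  if h : r = [] then copies
  else
    let r' := passL src r
    if h2 : r' = r then -1 else loopL src r' (copies + 1)
termination_by r.length
decreasing_by
  have hs := passL_suffix src r
  have hle := hs.length_le
  rcases Nat.lt_or_ge (passL src r).length r.length with h3 | h3
  · exact h3
  · exact absurd (hs.eq_of_length (le_antisymm hle h3)) h2

-- ===== ffind lemmas =====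

theorem ffind_eq_none_iff (l : List Char) (c : Char) : ffind l c = none ↔ c ∉ l := by
  induction l with
  | nil => simp [ffind]
  | cons a as ih =>
    simp only [ffind, List.mem_cons]
    split
    · simp_all
    · rename_i h
      cases hf : ffind as c <;> simp_all [eq_comm]

theorem ffind_eq_some (l : List Char) (c : Char) (p : Nat)
    (h1 : l[p]? = some c) (h2 : ∀ q, q < p → l[q]? ≠ some c) : ffind l c = some p := by
  induction l generalizing p with
  | nil => simp at h1
  | cons a as ih =>
    cases p with
    | zero => simp_all [ffind]
    | succ p =>
      have ha : a ≠ c := by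
        intro h; exact h2 0 (Nat.succ_pos p) (by simp [h])
      simp only [ffind, if_neg ha]
      have := ih p (by simpa using h1) (fun q hq => by
        have := h2 (q + 1) (by omega); simpa using this)
      simp [this]

theorem ffind_spec (l : List Char) (c : Char) (p : Nat) (h : ffind l c = some p) :
    l[p]? = some c ∧ ∀ q, q < p → l[q]? ≠ some c := by
  induction l generalizing p with
  | nil => simp [ffind] at h
  | cons a as ih =>
    simp only [ffind] at h
    split at h
    · rename_i ha
      cases h; simp [ha]
    · rename_i ha
      cases hf : ffind as c with
      | none => simp [hf] at h
      | some p' =>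
        simp [hf] at h
        subst h
        obtain ⟨h1, h2⟩ := ih p' hf
        refine ⟨by simpa using h1, ?_⟩
        intro q hq
        cases q with
        | zero => simpa [eq_comm] using ha
        | succ q => simpa using h2 q (by omega)

-- ===== lstF lemmas =====

theorem mem_lstF (l : List Char) (k : Int) (c : Char) (x : Int) :
    x ∈ lstF l k c ↔ ∃ (j : Nat), ∃ (_ : j < l.length), x = k + j ∧ l[j] = c := by
  induction l generalizing k with
  | nil => simp [lstF]
  | cons a as ih =>
    simp only [lstF]
    constructor
    · intro hx
      split at hx
      · rename_i ha
        rcases List.mem_cons.1 hx with h | h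
        · exact ⟨0, by simp, by simp [h, ha]⟩
        · rcases (ih (k + 1)).1 h with ⟨j, hj, hx, hc⟩
          exact ⟨j + 1, by simpa using hj, by push_cast; omega, by simpa using hc⟩
      · rcases (ih (k + 1)).1 hx with ⟨j, hj, hx, hc⟩
        exact ⟨j + 1, by simpa using hj, by push_cast; omega, by simpa using hc⟩
    · rintro ⟨j, hj, hx, hc⟩
      cases j with
      | zero =>
        simp at hc hx
        simp [hc, hx]
      | succ j =>
        have hmem : x ∈ lstF as (k + 1) c :=
          (ih (k + 1)).2 ⟨j, by simpa using hj, by push_cast at hx ⊢; omega, by simpa using hc⟩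
        split <;> simp [hmem]

theorem pairwise_lt_lstF (l : List Char) (k : Int) (c : Char) :
    (lstF l k c).Pairwise (· < ·) := by
  induction l generalizing k with
  | nil => simp [lstF]
  | cons a as ih =>
    simp only [lstF]
    split
    · refine List.Pairwise.cons ?_ (ih (k + 1))
      intro x hx
      rcases (mem_lstF as (k + 1) c x).1 hx with ⟨j, hj, hx, _⟩
      omega
    · exact ih (k + 1)

theorem lstF_eq_nil_iff (l : List Char) (k : Int) (c : Char) :
    lstF l k c = [] ↔ c ∉ l := by
  induction l generalizing k with
  | nil => simp [lstF]
  | cons a as ih =>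
    simp only [lstF, List.mem_cons]
    constructor
    · intro h
      split at h
      · simp at h
      · rename_i ha
        intro hor
        rcases hor with h2 | h2
        · exact ha h2.symm
        · exact (ih (k + 1)).1 h h2
    · intro h
      have ha : ¬ a = c := fun he => h (Or.inl he.symm)
      rw [if_neg ha]
      exact (ih (k + 1)).2 (fun hm => h (Or.inr hm))

-- ===== the dict built by A's first loop =====

theorem build_getD (c : Char) :
    ∀ (l : List Char) (k : Int) (d : PySem.Dict Char (List Int)),
      ((PySem.List.enumerate l k).foldl
          (fun d p => d.modify p.2 [] (fun v => v ++ [p.1])) d).getD c []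
        = d.getD c [] ++ lstF l k c := by
  intro l
  induction l with
  | nil => intro k d; simp [PySem.List.enumerate, lstF]
  | cons a as ih =>
    intro k d
    rw [PySem.List.enumerate_cons, List.foldl_cons, ih (k + 1)]
    rw [PySem.Dict.getD_modify]
    simp only [lstF]
    by_cases h : c = a
    · subst h; simp
    · rw [if_neg h, if_neg (fun he : a = c => h he.symm)]

theorem build_contains (c : Char) :
    ∀ (l : List Char) (k : Int) (d : PySem.Dict Char (List Int)),
      ((PySem.List.enumerate l k).foldl
          (fun d p => d.modify p.2 [] (fun v => v ++ [p.1])) d).contains c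
        = (d.contains c || decide (c ∈ l)) := by
  intro l
  induction l with
  | nil => intro k d; simp [PySem.List.enumerate]
  | cons a as ih =>
    intro k d
    rw [PySem.List.enumerate_cons, List.foldl_cons, ih (k + 1)]
    rw [PySem.Dict.contains_modify]
    by_cases h : c = a
    · subst h; simp
    · have hb : (c == a) = false := by simp [h]
      simp [hb, h]

-- ===== the bisect step of A equals the "next occurrence ≥ s" of goR =====

theorem lstF_elem_nat (src : List Char) (c : Char) (x : Int) (hx : x ∈ lstF src 0 c) :
    ∃ (j : Nat), (j : Int) = x ∧ ∃ (_ : j < src.length), src[j] = c := by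
  rcases (mem_lstF src 0 c x).1 hx with ⟨j, hj, hx, hc⟩
  exact ⟨j, by omega, hj, hc⟩

theorem step_lt (src : List Char) (c : Char) (s : Nat)
    (hj : PySem.List.bisectLeft (lstF src 0 c) (s : Int) < (lstF src 0 c).length) :
    ∃ p, ffind (src.drop s) c = some p ∧
      (lstF src 0 c)[PySem.List.bisectLeft (lstF src 0 c) (s : Int)]'hj = ((s + p : Nat) : Int) := by
  set lst := lstF src 0 c with hlst
  set j := PySem.List.bisectLeft lst (s : Int) with hjdef
  have hpw : lst.Pairwise (· ≤ ·) :=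
    (pairwise_lt_lstF src 0 c).imp (fun h => le_of_lt h)
  obtain ⟨hle, hlt, hge⟩ := PySem.List.bisectLeft_spec lst (s : Int) hpw
  -- the chosen element is an occurrence index jj ≥ s
  have hmem : lst[j] ∈ lst := List.getElem_mem hj
  rcases lstF_elem_nat src c _ hmem with ⟨jj, hjj, hjjlt, hjjc⟩
  have hsle : (s : Int) ≤ lst[j] := hge j hj (le_refl j)
  have hsjj : s ≤ jj := by omega
  refine ⟨jj - s, ?_, by rw [← hjj]; push_cast; omega⟩
  apply ffind_eq_some
  · rw [List.getElem?_drop]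
    have : s + (jj - s) = jj := by omega
    rw [this]
    simp [List.getElem?_eq_getElem hjjlt, hjjc]
  · intro q hq hqc
    rw [List.getElem?_drop] at hqc
    have hlen : s + q < src.length := (List.getElem?_eq_some_iff.1 hqc).1
    have hcq : src[s + q] = c := by
      have := (List.getElem?_eq_some_iff.1 hqc).2; exact this
    -- then (s+q) is in lst, at some index idx ≥ j, contradicting s+q < jj = lst[j]
    have hmem2 : ((s + q : Nat) : Int) ∈ lst := by
      rw [hlst, mem_lstF]
      exact ⟨s + q, hlen, by omega, hcq⟩
    rcases List.mem_iff_getElem.1 hmem2 with ⟨idx, hidx, hidxeq⟩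
    have hjidx : j ≤ idx := by
      by_contra hcon
      have := hlt idx hidx (by omega)
      omega
    have hmono : lst[j] ≤ lst[idx] := by
      rcases Nat.eq_or_lt_of_le hjidx with h | h
      · subst h; omega
      · exact le_of_lt ((List.pairwise_iff_getElem.1 (pairwise_lt_lstF src 0 c)) j idx hj hidx h)
    omega

theorem step_ge (src : List Char) (c : Char) (s : Nat)
    (hj : PySem.List.bisectLeft (lstF src 0 c) (s : Int) = (lstF src 0 c).length) :
    ffind (src.drop s) c = none := by
  set lst := lstF src 0 c with hlst
  have hpw : lst.Pairwise (· ≤ ·) :=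
    (pairwise_lt_lstF src 0 c).imp (fun h => le_of_lt h)
  obtain ⟨hle, hlt, hge⟩ := PySem.List.bisectLeft_spec lst (s : Int) hpw
  rw [ffind_eq_none_iff]
  intro hmem
  rcases List.mem_iff_getElem.1 hmem with ⟨q, hq, hqc⟩
  have hlen : s + q < src.length := by
    have := hq; simp [List.length_drop] at this; omega
  have hcq : src[s + q] = c := by
    have h1 : (src.drop s)[q]? = src[s + q]? := List.getElem?_drop
    rw [List.getElem?_eq_getElem hq, hqc] at h1
    exact ((List.getElem?_eq_some_iff.1 h1.symm).2)
  have hmem2 : ((s + q : Nat) : Int) ∈ lst := by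
    rw [hlst, mem_lstF]
    exact ⟨s + q, hlen, by omega, hcq⟩
  rcases List.mem_iff_getElem.1 hmem2 with ⟨idx, hidx, hidxeq⟩
  have := hlt idx hidx (by omega)
  omega

theorem step_head (src : List Char) (c : Char) (hc : c ∈ src) :
    ∃ q, ffind src c = some q ∧ (lstF src 0 c)[0]? = some ((q : Nat) : Int) := by
  have hne : lstF src 0 c ≠ [] := by
    rw [ne_eq, lstF_eq_nil_iff]; simp [hc]
  cases hf : ffind src c with
  | none => exact absurd ((ffind_eq_none_iff src c).1 hf) (by simp [hc])
  | some q =>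
    obtain ⟨h1, h2⟩ := ffind_spec src c q hf
    have h0 : 0 < (lstF src 0 c).length := List.length_pos_iff.2 hne
    have hmem : (lstF src 0 c)[0] ∈ lstF src 0 c := List.getElem_mem h0
    rcases lstF_elem_nat src c _ hmem with ⟨j0, hj0, hj0lt, hj0c⟩
    -- q ≤ j0 by minimality of ffind, j0 ≤ q since q's index is in lst and lst[0] is minimal
    have hqlt : q < src.length := (List.getElem?_eq_some_iff.1 h1).1
    have hqc : src[q] = c := (List.getElem?_eq_some_iff.1 h1).2
    have hqmem : ((q : Nat) : Int) ∈ lstF src 0 c := by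
      rw [mem_lstF]; exact ⟨q, hqlt, by omega, hqc⟩
    rcases List.mem_iff_getElem.1 hqmem with ⟨idx, hidx, hidxeq⟩
    have hmono : (lstF src 0 c)[0] ≤ (lstF src 0 c)[idx] := by
      rcases Nat.eq_zero_or_pos idx with h | h
      · subst h; omega
      · exact le_of_lt ((List.pairwise_iff_getElem.1 (pairwise_lt_lstF src 0 c)) 0 idx h0 hidx h)
    have hq_le_j0 : q ≤ j0 := by
      by_contra hcon
      exact h2 j0 (by omega) (by simp [List.getElem?_eq_getElem hj0lt, hj0c])
    have : j0 ≤ q := by omega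
    refine ⟨q, rfl, ?_⟩
    rw [List.getElem?_eq_getElem h0]
    exact congrArg some (by omega)

-- ===== A equals goR =====

theorem goA_eq (src : List Char) :
    ∀ (rest : List Char) (s : Nat) (cnt : Int),
      shortestWayLoop
        ((PySem.List.enumerate src).foldl
          (fun d p => d.modify p.2 [] (fun v => v ++ [p.1])) PySem.Dict.empty)
        rest (s : Int) cnt
      = if s = 0 ∧ rest = [] then cnt else goR src rest s (cnt + 1) := by
  intro rest
  induction rest with
  | nil =>
    intro s cnt
    by_cases hs : s = 0
    · subst hs; simp [shortestWayLoop]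
    · simp [shortestWayLoop, hs, goR]
  | cons c cs ih =>
    intro s cnt
    rw [if_neg (by simp)]
    simp only [shortestWayLoop]
    rw [build_contains c src 0 PySem.Dict.empty, PySem.Dict.contains_empty,
        build_getD c src 0 PySem.Dict.empty, PySem.Dict.getD_empty, List.nil_append]
    by_cases hc : c ∈ src
    · rw [if_pos (by simp [hc])]
      by_cases hj : PySem.List.bisectLeft (lstF src 0 c) (s : Int) = (lstF src 0 c).length
      · -- wrap around: count one more copy, restart at the first occurrence
        rcases step_head src c hc with ⟨q, hfq, h0q⟩
        rw [if_pos hj]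
        have hlen0 : 0 < (lstF src 0 c).length :=
          List.length_pos_iff.2 (fun h => absurd hc ((lstF_eq_nil_iff src 0 c).1 h))
        have hget : PySem.List.pyGetD (lstF src 0 c) ((0 : Nat) : Int) 0 = (q : Int) := by
          rw [PySem.List.pyGetD_natCast]
          simp [List.getD, h0q]
        have hcast : (q : Int) + 1 = (((q + 1 : Nat)) : Int) := by push_cast; ring
        show shortestWayLoop _ cs (PySem.List.pyGetD (lstF src 0 c) ((0 : Nat) : Int) 0 + 1) (cnt + 1) = _
        rw [hget, hcast, ih (q + 1) (cnt + 1)]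
        rw [if_neg (by omega)]
        conv_rhs => rw [goR]
        rw [step_ge src c s hj, hfq]
      · have hjlt : PySem.List.bisectLeft (lstF src 0 c) (s : Int) < (lstF src 0 c).length := by
          have hpw : (lstF src 0 c).Pairwise (· ≤ ·) :=
            (pairwise_lt_lstF src 0 c).imp (fun h => le_of_lt h)
          have := (PySem.List.bisectLeft_spec (lstF src 0 c) (s : Int) hpw).1
          omega
        rcases step_lt src c s hjlt with ⟨p, hfp, hval⟩
        rw [if_neg hj]
        have hget : PySem.List.pyGetD (lstF src 0 c)
            ((PySem.List.bisectLeft (lstF src 0 c) (s : Int) : Nat) : Int) 0 = ((s + p : Nat) : Int) := by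
          rw [PySem.List.pyGetD_natCast]
          rw [List.getD_eq_getElem (lstF src 0 c) 0 hjlt, hval]
        have hcast : ((s + p : Nat) : Int) + 1 = (((s + p + 1 : Nat)) : Int) := by push_cast; ring
        show shortestWayLoop _ cs (PySem.List.pyGetD (lstF src 0 c)
            ((PySem.List.bisectLeft (lstF src 0 c) (s : Int) : Nat) : Int) 0 + 1) cnt = _
        rw [hget, hcast, ih (s + p + 1) cnt]
        rw [if_neg (by omega)]
        conv_rhs => rw [goR]
        rw [hfp]
    · rw [if_neg (by simp [hc])]
      have h1 : ffind (List.drop s src) c = none :=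
        (ffind_eq_none_iff _ c).2 (fun hm => hc (List.drop_subset _ _ hm))
      have h2 : ffind src c = none := (ffind_eq_none_iff _ c).2 hc
      conv_rhs => rw [goR]
      rw [h1, h2]

theorem shortestWay_eq_goR (source target : String) :
    shortestWay source target =
      if target.toList = [] then 0 else goR source.toList target.toList 0 1 := by
  show shortestWayLoop _ target.toList ((0 : Nat) : Int) 0 = _
  rw [goA_eq source.toList target.toList 0 0]
  by_cases ht : target.toList = [] <;> simp [ht]

-- ===== B equals goR =====

theorem passL_of_ffind_none (ss : List Char) (d : Char) (r : List Char)
    (h : ffind ss d = none) : passL ss (d :: r) = d :: r := by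
  induction ss with
  | nil => rfl
  | cons a as ih =>
    simp only [ffind] at h
    split at h
    · simp at h
    · rename_i ha
      have hd : ¬ d = a := fun he => ha he.symm
      cases hf : ffind as d with
      | none => simp only [passL, if_neg hd]; exact ih hf
      | some p => simp [hf] at h

theorem passL_of_ffind_some (ss : List Char) (d : Char) (r : List Char) (p : Nat)
    (h : ffind ss d = some p) : passL ss (d :: r) = passL (ss.drop (p + 1)) r := by
  induction ss generalizing p with
  | nil => simp [ffind] at h
  | cons a as ih =>
    simp only [ffind] at h
    split at h
    · rename_i ha
      cases h
      simp [passL, ha.symm]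
    · rename_i ha
      have hd : ¬ d = a := fun he => ha he.symm
      cases hf : ffind as d with
      | none => simp [hf] at h
      | some p' =>
        simp [hf] at h
        subst h
        simp only [passL, if_neg hd]
        rw [ih p' hf]
        rfl

theorem passB_drop (t : List Char) :
    ∀ (src : List Char) (i : Nat), i ≤ t.length →
      passB t src i ≤ t.length ∧ t.drop (passB t src i) = passL src (t.drop i) := by
  intro src
  induction src with
  | nil => intro i hi; exact ⟨hi, rfl⟩
  | cons a as ih =>
    intro i hi
    show passB t as (if i < t.length ∧ t[i]? = some a then i + 1 else i) ≤ t.length ∧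
      t.drop (passB t as (if i < t.length ∧ t[i]? = some a then i + 1 else i)) = passL (a :: as) (t.drop i)
    by_cases hlt : i < t.length
    · rw [List.drop_eq_getElem_cons hlt]
      by_cases he : t[i] = a
      · rw [if_pos ⟨hlt, by simp [List.getElem?_eq_getElem hlt, he]⟩]
        refine ⟨(ih (i + 1) hlt).1, ?_⟩
        rw [(ih (i + 1) hlt).2]
        simp [passL, he]
      · rw [if_neg (by simp [List.getElem?_eq_getElem hlt]; intro; exact he)]
        refine ⟨(ih i hi).1, ?_⟩
        rw [(ih i hi).2, List.drop_eq_getElem_cons hlt]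
        simp only [passL]
        rw [if_neg he]
    · rw [if_neg (by omega)]
      have hdrop : t.drop i = [] := List.drop_eq_nil_of_le (by omega)
      refine ⟨(ih i hi).1, ?_⟩
      rw [(ih i hi).2, hdrop]
      simp only [passL]

theorem goR_boundary (src : List Char) :
    ∀ (rest : List Char) (s : Nat) (cnt : Int),
      goR src rest s cnt =
        match passL (src.drop s) rest with
        | [] => cnt
        | d :: r' => if ffind src d = none then -1 else goR src (d :: r') 0 (cnt + 1) := by
  intro rest
  induction rest with
  | nil => intro s cnt; rw [passL_nil]; rfl
  | cons c cs ih =>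
    intro s cnt
    cases hf : ffind (src.drop s) c with
    | some p =>
      rw [passL_of_ffind_some _ _ _ _ hf, List.drop_drop]
      have : goR src (c :: cs) s cnt = goR src cs (s + p + 1) cnt := by
        simp [goR, hf]
      rw [this]
      have harith : s + (p + 1) = s + p + 1 := by omega
      rw [harith]
      exact ih (s + p + 1) cnt
    | none =>
      rw [passL_of_ffind_none _ _ _ hf]
      cases hg : ffind src c with
      | none => simp [goR, hf, hg]
      | some q =>
        have hL : goR src (c :: cs) s cnt = goR src cs (q + 1) (cnt + 1) := by
          simp [goR, hf, hg]
        have hR : goR src (c :: cs) 0 (cnt + 1) = goR src cs (q + 1) (cnt + 1) := by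
          simp [goR, hg]
        simp only [hL]
        rw [if_neg (by simp [hg]), hR]

theorem loopL_eq (src : List Char) :
    ∀ (r : List Char) (copies : Int),
      loopL src r copies = if r = [] then copies else goR src r 0 (copies + 1) := by
  have H : ∀ (n : Nat) (r : List Char) (copies : Int), r.length ≤ n →
      loopL src r copies = if r = [] then copies else goR src r 0 (copies + 1) := by
    intro n
    induction n with
    | zero =>
      intro r copies hr
      have : r = [] := List.eq_nil_of_length_eq_zero (by omega)
      subst this
      rw [loopL]
      simp
    | succ n ihn =>
      intro r copies hr
      cases r with
      | nil => rw [loopL]; simp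
      | cons d cs =>
        rw [loopL]
        rw [dif_neg (by simp)]
        rw [if_neg (by simp)]
        cases hf : ffind src d with
        | none =>
          rw [passL_of_ffind_none _ _ _ hf]
          rw [dif_pos rfl]
          simp [goR, hf, List.drop_zero]
        | some p =>
          rw [passL_of_ffind_some _ _ _ _ hf]
          have hsuf := passL_suffix (src.drop (p + 1)) cs
          have hlen : (passL (src.drop (p + 1)) cs).length ≤ cs.length := hsuf.length_le
          rw [dif_neg (by
            intro he
            have := congrArg List.length he
            simp at this
            omega)]
          rw [ihn _ (copies + 1) (by simp at hr ⊢; omega)]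
          have hR : goR src (d :: cs) 0 (copies + 1) = goR src cs (p + 1) (copies + 1) := by
            simp [goR, hf]
          rw [hR, goR_boundary src cs (p + 1) (copies + 1)]
          cases hr' : passL (src.drop (p + 1)) cs with
          | nil => simp
          | cons d' r'' =>
            rw [if_neg (by simp)]
            show goR src (d' :: r'') 0 (copies + 1 + 1) =
              if ffind src d' = none then -1 else goR src (d' :: r'') 0 (copies + 1 + 1)
            cases hg : ffind src d' with
            | none => simp [goR, hg]
            | some q => simp
  intro r copies
  exact H r.length r copies (le_refl _)

theorem loopB_eq (src t : List Char) :
    ∀ (i : Nat) (copies : Int), i ≤ t.length →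
      loopB src t i copies = loopL src (t.drop i) copies := by
  have H : ∀ (n : Nat) (i : Nat) (copies : Int), i ≤ t.length → t.length - i ≤ n →
      loopB src t i copies = loopL src (t.drop i) copies := by
    intro n
    induction n with
    | zero =>
      intro i copies hi hn
      have hie : i = t.length := by omega
      rw [loopB, dif_neg (by omega)]
      rw [List.drop_eq_nil_of_le (by omega), loopL]
      simp
    | succ n ihn =>
      intro i copies hi hn
      by_cases hlt : i < t.length
      · obtain ⟨hle', hdrop⟩ := passB_drop t src i hi
        rw [loopB, dif_pos hlt]
        have hne : t.drop i ≠ [] := by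
          intro he
          have := congrArg List.length he
          simp at this
          omega
        by_cases h2 : passB t src i = i
        · rw [dif_pos h2]
          rw [loopL, dif_neg hne, dif_pos (by rw [← hdrop, h2])]
        · rw [dif_neg h2]
          have hlt' : i < passB t src i :=
            lt_of_le_of_ne (passB_le t src i) (fun he => h2 he.symm)
          rw [ihn (passB t src i) (copies + 1) hle' (by omega)]
          conv_rhs => rw [loopL]
          rw [dif_neg hne]
          rw [dif_neg (show ¬ passL src (t.drop i) = t.drop i from by
            intro he
            rw [← hdrop] at he
            have := congrArg List.length he
            simp at this
            omega)]
          rw [← hdrop]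
      · rw [loopB, dif_neg hlt]
        rw [List.drop_eq_nil_of_le (by omega), loopL]
        simp
  intro i copies hi
  exact H (t.length - i) i copies hi (le_refl _)

theorem shortestWay_alt_eq_goR (source target : String) :
    shortestWay_alt source target =
      if target.toList = [] then 0 else goR source.toList target.toList 0 1 := by
  show loopB source.toList target.toList 0 0 = _
  rw [loopB_eq source.toList target.toList 0 0 (Nat.zero_le _), List.drop_zero,
      loopL_eq source.toList target.toList 0]
  norm_num

-- ===== VERDICT (by name: the statement is the Claim_ definition above) =====
theorem shortestWay_spec : Claim_equal_shortestWay := by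
  intro source target _
  unfold Spec_shortestWay
  rw [shortestWay_eq_goR, shortestWay_alt_eq_goR]
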